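-- pv_equiv track=rewrite | github.com/perlygatekeeper/glowing-robot | google_test/free_the_bunny_prisoners/solution_5_fails.py | solution
-- ===== SOURCE A (Python) =====
-- import itertools
--
-- def solution(bunnies,keys_required):
--     answer = []
--     for i in range(bunnies):
--         answer.append([])
-- #   if keys_required > bunnies:
-- #       return None
--     if keys_required == 0:
--         return [[0]]
--     elif keys_required == 1:
--         key = 0
--         for group in range(bunnies):
--             answer[group].append(key)
--     elif bunnies == keys_required:
--         key = 0
--         for group in range(bunnies):
--             answer[group].append(key)
--             key += 1
--     else:
--         key = 0
--         for item in itertools.combinations(range(bunnies), keys_required):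
--             for group in item:
--                 answer[group].append(key)
--             key += 1
--     return answer
-- ===== SOURCE B (Python) =====
-- import itertools
--
-- def solution(bunnies, keys_required):
--     if keys_required == 0:
--         return [[0]]
--     if keys_required == 1:
--         return [[0] for _ in range(bunnies)]
--     if bunnies == keys_required:
--         return [[g] for g in range(bunnies)]
--     combos = list(itertools.combinations(range(bunnies), keys_required))
--     return [[k for k, item in enumerate(combos) if g in item] for g in range(bunnies)]
-- ===== Notes on version B (the rewrite author's own statement) =====
-- stated objective: alternative
-- what changed: B replaces A's imperative scheme (pre-allocated per-group accumulators mutated while scanning each combination) by a per-group construction: each group's key list is computed independently as a comprehension over the enumerated combination list, and the three special cases become direct comprehensions instead of append loops.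
import Mathlib
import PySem

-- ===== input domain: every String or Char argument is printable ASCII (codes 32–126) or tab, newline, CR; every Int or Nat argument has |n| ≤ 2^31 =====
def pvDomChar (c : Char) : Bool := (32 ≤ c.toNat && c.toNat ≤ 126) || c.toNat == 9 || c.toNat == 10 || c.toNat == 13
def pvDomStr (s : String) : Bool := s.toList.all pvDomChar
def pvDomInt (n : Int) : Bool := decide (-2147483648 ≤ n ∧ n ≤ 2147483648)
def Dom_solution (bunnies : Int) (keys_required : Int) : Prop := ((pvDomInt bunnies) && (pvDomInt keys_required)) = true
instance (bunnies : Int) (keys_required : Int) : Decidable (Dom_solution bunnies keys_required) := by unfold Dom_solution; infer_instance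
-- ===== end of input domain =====

-- B builds each group's key list independently (comprehensions over the enumerated
-- combination list) instead of A's mutation of pre-allocated per-group accumulators;
-- objective: alternative decomposition (same results, no speed claim).

-- ===== PORT A =====

-- itertools.combinations(pool, r) in lexicographic order (hand port, exact for r ≥ 0:
-- combos with the first element come first, in order, then combos without it).
def pyCombinations (pool : List Int) (r : Nat) : List (List Int) :=
  match r, pool with
  | 0, _ => [[]]
  | _ + 1, [] => []
  | s + 1, x :: xs => (pyCombinations xs s).map (fun c => x :: c) ++ pyCombinations xs (s + 1)

def solution (bunnies : Int) (keys_required : Int) : List (List Int) :=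
  -- answer = [[] for i in range(bunnies)]
  let answer : List (List Int) := (PySem.List.pyRange 0 bunnies 1).map (fun _ => [])
  if keys_required = 0 then [[0]]
  else if keys_required = 1 then
    -- for group in range(bunnies): answer[group].append(0)
    (PySem.List.pyRange 0 bunnies 1).foldl
      (fun ans group => ans.modify group.toNat (· ++ [0])) answer
  else if bunnies = keys_required then
    -- key = 0; for group in range(bunnies): answer[group].append(key); key += 1
    ((PySem.List.pyRange 0 bunnies 1).foldl
      (fun (st : List (List Int) × Int) group =>
        (st.1.modify group.toNat (· ++ [st.2]), st.2 + 1)) (answer, 0)).1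
  else
    -- keys_required.toNat: Python raises ValueError for keys_required < 0 here (outside Pre_)
    ((pyCombinations (PySem.List.pyRange 0 bunnies 1) keys_required.toNat).foldl
      (fun (st : List (List Int) × Int) item =>
        (item.foldl (fun a group => a.modify group.toNat (· ++ [st.2])) st.1, st.2 + 1))
      (answer, 0)).1

-- ===== PORT B =====
def solution_alt (bunnies : Int) (keys_required : Int) : List (List Int) :=
  if keys_required = 0 then [[0]]
  else if keys_required = 1 then (PySem.List.pyRange 0 bunnies 1).map (fun _ => [0])
  else if bunnies = keys_required then (PySem.List.pyRange 0 bunnies 1).map (fun g => [g])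
  else
    -- keys_required.toNat: Python raises ValueError for keys_required < 0 here (outside Pre_)
    let combos := pyCombinations (PySem.List.pyRange 0 bunnies 1) keys_required.toNat
    (PySem.List.pyRange 0 bunnies 1).map (fun g =>
      (PySem.List.enumerate combos 0).filterMap
        (fun kc => if g ∈ kc.2 then some kc.1 else none))

-- ===== PRECONDITION & SPEC =====
-- Pre_ excludes exactly the inputs where Python A raises: keys_required < 0 reaching the
-- general branch makes itertools.combinations raise ValueError (B raises there too).
def Pre_solution (bunnies : Int) (keys_required : Int) : Prop :=
  0 ≤ keys_required ∨ bunnies = keys_required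
instance (bunnies : Int) (keys_required : Int) : Decidable (Pre_solution bunnies keys_required) := by unfold Pre_solution; infer_instance

def pvWitness_solution : Int × Int := (4, 2)

def Spec_solution (bunnies : Int) (keys_required : Int) (out : List (List Int)) : Prop := out = solution_alt bunnies keys_required
instance (bunnies : Int) (keys_required : Int) (out : List (List Int)) : Decidable (Spec_solution bunnies keys_required out) := by unfold Spec_solution; infer_instance

-- ===== CLAIM (what is proved, stated in full; the proofs are below) =====
def Claim_equal_solution : Prop := ∀ (bunnies : Int) (keys_required : Int), Dom_solution bunnies keys_required → Pre_solution bunnies keys_required → Spec_solution bunnies keys_required (solution bunnies keys_required)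

-- ===== LEMMAS AND PROOFS =====

-- the keys, starting at key number k0, that combos assigns to group g
def keysFrom (combos : List (List Int)) (k0 : Int) (g : Int) : List Int :=
  match combos with
  | [] => []
  | c :: rest => (if g ∈ c then [k0] else []) ++ keysFrom rest (k0 + 1) g

theorem keysFrom_eq_filterMap (combos : List (List Int)) (k0 : Int) (g : Int) :
    keysFrom combos k0 g
      = (PySem.List.enumerate combos k0).filterMap
          (fun kc => if g ∈ kc.2 then some kc.1 else none) := by
  induction combos generalizing k0 with
  | nil => simp [keysFrom, PySem.List.enumerate_nil]
  | cons c rest ih =>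
      rw [PySem.List.enumerate_cons]
      simp only [keysFrom, List.filterMap_cons]
      by_cases h : g ∈ c <;> simp [h, ih]

theorem mem_pyCombinations_sublist (pool : List Int) (r : Nat) (c : List Int)
    (h : c ∈ pyCombinations pool r) : c.Sublist pool := by
  induction pool generalizing r c with
  | nil =>
      cases r with
      | zero => simp [pyCombinations] at h; simp [h]
      | succ s => simp [pyCombinations] at h
  | cons x xs ih =>
      cases r with
      | zero => simp [pyCombinations] at h; simp [h]
      | succ s =>
          simp only [pyCombinations, List.mem_append, List.mem_map] at h
          rcases h with ⟨c', hc', rfl⟩ | h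
          · exact List.Sublist.cons₂ x (ih s c' hc')
          · exact List.Sublist.cons x (ih (s + 1) c h)

-- one combination's append loop, pointwise
theorem fold_item_getElem? (item : List Int) (key : Int) :
    ∀ (ans : List (List Int)) (j : Nat), item.Nodup → (∀ g ∈ item, 0 ≤ g) →
    (item.foldl (fun a g => a.modify g.toNat (· ++ [key])) ans)[j]?
      = ans[j]?.map (fun x => x ++ (if (j : Int) ∈ item then [key] else [])) := by
  induction item with
  | nil => intro ans j _ _; cases hx : ans[j]? <;> simp [hx]
  | cons g rest ih =>
      intro ans j hnd hpos
      have hg0 : 0 ≤ g := hpos g (List.mem_cons_self ..)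
      have hgr : g ∉ rest := (List.nodup_cons.mp hnd).1
      have hnd' := (List.nodup_cons.mp hnd).2
      have hpos' : ∀ x ∈ rest, 0 ≤ x := fun x hx => hpos x (List.mem_cons_of_mem g hx)
      simp only [List.foldl_cons]
      rw [ih _ j hnd' hpos']
      by_cases hgj : g = (j : Int)
      · have ht : g.toNat = j := by omega
        rw [ht, List.getElem?_modify_eq]
        have hjr : (j : Int) ∉ rest := fun h => hgr (hgj ▸ h)
        have hjc : (j : Int) ∈ g :: rest := by
          rw [← hgj]; exact List.mem_cons_self ..
        cases ans[j]? <;> simp [hjr, hjc]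
      · have hgj' : g.toNat ≠ j := by omega
        rw [List.getElem?_modify_ne _ _ hgj']
        have hne : ¬ ((j : Int) = g) := fun h => hgj h.symm
        cases ans[j]? <;> simp [List.mem_cons, hne]

-- the main loop over combinations, pointwise: index j collects keysFrom
theorem fold_combos_getElem? (combos : List (List Int)) :
    ∀ (ans : List (List Int)) (k0 : Int) (j : Nat),
    (∀ c ∈ combos, c.Nodup ∧ ∀ g ∈ c, 0 ≤ g) →
    ((combos.foldl
        (fun (st : List (List Int) × Int) item =>
          (item.foldl (fun a group => a.modify group.toNat (· ++ [st.2])) st.1, st.2 + 1))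
        (ans, k0)).1)[j]?
      = ans[j]?.map (fun x => x ++ keysFrom combos k0 (j : Int)) := by
  induction combos with
  | nil => intro ans k0 j _; cases hx : ans[j]? <;> simp [hx, keysFrom]
  | cons c rest ih =>
      intro ans k0 j h
      simp only [List.foldl_cons]
      rw [ih _ (k0 + 1) j (fun c' hc' => h c' (List.mem_cons_of_mem c hc'))]
      rw [fold_item_getElem? c k0 ans j (h c (List.mem_cons_self ..)).1
            (h c (List.mem_cons_self ..)).2]
      simp only [keysFrom, Option.map_map]
      cases ans[j]? <;> simp

-- the counter loop of the bunnies == keys_required branch, pointwise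
theorem fold_counter_getElem? (a b : Int) (ha : 0 ≤ a) (k0 : Int)
    (ans : List (List Int)) (j : Nat) :
    (((PySem.List.pyRange a b 1).foldl
        (fun (st : List (List Int) × Int) group =>
          (st.1.modify group.toNat (· ++ [st.2]), st.2 + 1)) (ans, k0)).1)[j]?
      = ans[j]?.map (fun x =>
          x ++ (if a ≤ (j : Int) ∧ (j : Int) < b then [k0 + ((j : Int) - a)] else [])) := by
  generalize hn : (b - a).toNat = n
  induction n generalizing a k0 ans with
  | zero =>
      rw [PySem.List.pyRange_one_eq_nil (by omega)]
      simp only [List.foldl_nil]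
      rw [if_neg (show ¬ (a ≤ (j : Int) ∧ (j : Int) < b) by omega)]
      cases ans[j]? <;> simp
  | succ n ihn =>
      rw [PySem.List.pyRange_one_cons (by omega)]
      simp only [List.foldl_cons]
      rw [ihn (a + 1) (by omega) (k0 + 1) _ (by omega)]
      by_cases hja : a.toNat = j
      · rw [hja, List.getElem?_modify_eq]
        rw [if_neg (show ¬ ((a + 1) ≤ (j : Int) ∧ (j : Int) < b) by omega),
            if_pos (show a ≤ (j : Int) ∧ (j : Int) < b by omega)]
        have hk : k0 + ((j : Int) - a) = k0 := by omega
        cases ans[j]? <;> simp [hk]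
      · rw [List.getElem?_modify_ne _ _ hja]
        have hcongr : (if (a + 1) ≤ (j : Int) ∧ (j : Int) < b then [k0 + 1 + ((j : Int) - (a + 1))] else [])
            = (if a ≤ (j : Int) ∧ (j : Int) < b then [k0 + ((j : Int) - a)] else []) := by
          by_cases h : (a + 1) ≤ (j : Int) ∧ (j : Int) < b
          · rw [if_pos h, if_pos (by omega)]
            have : k0 + 1 + ((j : Int) - (a + 1)) = k0 + ((j : Int) - a) := by ring
            rw [this]
          · rw [if_neg h, if_neg (by omega)]
        rw [hcongr]

theorem solution_spec : Claim_equal_solution := by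
  intro bunnies keys_required _hdom hpre
  unfold Spec_solution solution solution_alt
  by_cases h0 : keys_required = 0
  · simp [h0]
  · rw [if_neg h0, if_neg h0]
    by_cases h1 : keys_required = 1
    · rw [if_pos h1, if_pos h1]
      apply List.ext_getElem?_iff.mpr
      intro j
      rw [fold_item_getElem? _ 0 _ j (PySem.List.nodup_pyRange_one 0 bunnies)
            (fun g hg => (PySem.List.mem_pyRange_one.mp hg).1)]
      rw [List.getElem?_map, List.getElem?_map, PySem.List.getElem?_pyRange_one]
      by_cases hj : (j : Int) < bunnies
      · have hjt : j < (bunnies - 0).toNat := by omega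
        have hmem : ((j : Int)) ∈ PySem.List.pyRange 0 bunnies 1 :=
          PySem.List.mem_pyRange_one.mpr ⟨by omega, hj⟩
        simp only [if_pos hjt]
        simp [hmem]
      · have hjt : ¬ j < (bunnies - 0).toNat := by omega
        simp only [if_neg hjt]
        rfl
    · rw [if_neg h1, if_neg h1]
      by_cases h2 : bunnies = keys_required
      · rw [if_pos h2, if_pos h2]
        apply List.ext_getElem?_iff.mpr
        intro j
        rw [fold_counter_getElem? 0 bunnies (by omega) 0 _ j]
        rw [List.getElem?_map, List.getElem?_map, PySem.List.getElem?_pyRange_one]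
        by_cases hj : (j : Int) < bunnies
        · have hjt : j < (bunnies - 0).toNat := by omega
          have hcond : (0 : Int) ≤ (j : Int) ∧ (j : Int) < bunnies := ⟨by omega, hj⟩
          simp only [if_pos hjt]
          simp [hcond]
        · have hjt : ¬ j < (bunnies - 0).toNat := by omega
          simp only [if_neg hjt]
          rfl
      · rw [if_neg h2, if_neg h2]
        apply List.ext_getElem?_iff.mpr
        intro j
        have hcprop : ∀ c ∈ pyCombinations (PySem.List.pyRange 0 bunnies 1) keys_required.toNat,
            c.Nodup ∧ ∀ g ∈ c, 0 ≤ g := by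
          intro c hc
          have hsub := mem_pyCombinations_sublist _ _ c hc
          refine ⟨hsub.nodup (PySem.List.nodup_pyRange_one 0 bunnies), ?_⟩
          intro g hg
          exact (PySem.List.mem_pyRange_one.mp (hsub.mem hg)).1
        rw [fold_combos_getElem? _ _ 0 j hcprop]
        rw [List.getElem?_map, List.getElem?_map, PySem.List.getElem?_pyRange_one]
        by_cases hj : (j : Int) < bunnies
        · have hjt : j < (bunnies - 0).toNat := by omega
          simp only [if_pos hjt, Option.map_some]
          rw [← keysFrom_eq_filterMap]
          simp
        · have hjt : ¬ j < (bunnies - 0).toNat := by omega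
          simp only [if_neg hjt]
          rfl
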